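-- pv_equiv track=rewrite | github.com/bbaserdem/lapack | examples/find_circular_dependencies.py | analyze_cycle_impact
-- ===== SOURCE A (Python) =====
-- from collections import defaultdict, deque
--
-- def analyze_cycle_impact(graph, cycle):
--     """Analyze the impact of a cycle by finding all routines that depend on it."""
--     cycle_nodes = set(cycle[:-1])  # Exclude repeated last node
--     impacted = set()
--
--     # Find all nodes that can reach any node in the cycle
--     for node in graph:
--         if node not in cycle_nodes:
--             # BFS to check if this node can reach the cycle
--             queue = deque([node])
--             visited = set([node])
--
--             while queue:
--                 current = queue.popleft()
--                 if current in cycle_nodes: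
--                     impacted.add(node)
--                     break
--
--                 if current in graph:
--                     for neighbor in graph[current]:
--                         if neighbor not in visited:
--                             visited.add(neighbor)
--                             queue.append(neighbor)
--
--     return impacted
-- ===== SOURCE B (Python) =====
-- from collections import deque
--
-- def analyze_cycle_impact(graph, cycle):
--     """Analyze the impact of a cycle by finding all routines that depend on it."""
--     cycle_nodes = set(cycle[:-1])  # Exclude repeated last node
--     # Build the reversed adjacency: rev[v] lists every u with an edge u -> v.
--     rev = {}
--     for u, nbrs in graph.items():
--         for v in nbrs:
--             rev.setdefault(v, []).append(u)
--     # One multi-source BFS on the reversed graph, started from the cycle nodes,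
--     # marks every node that can reach the cycle.
--     reach = set(cycle_nodes)
--     queue = deque(cycle_nodes)
--     while queue:
--         v = queue.popleft()
--         for u in rev.get(v, []):
--             if u not in reach:
--                 reach.add(u)
--                 queue.append(u)
--     return {n for n in graph if n not in cycle_nodes and n in reach}
-- ===== Notes on version B (the rewrite author's own statement) =====
-- stated objective: alternative
-- what changed: Instead of running a separate BFS from every graph node to test whether it reaches the cycle, B builds the reversed adjacency once and runs a single multi-source BFS from the cycle nodes, then keeps the graph keys marked reachable.
import Mathlib
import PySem

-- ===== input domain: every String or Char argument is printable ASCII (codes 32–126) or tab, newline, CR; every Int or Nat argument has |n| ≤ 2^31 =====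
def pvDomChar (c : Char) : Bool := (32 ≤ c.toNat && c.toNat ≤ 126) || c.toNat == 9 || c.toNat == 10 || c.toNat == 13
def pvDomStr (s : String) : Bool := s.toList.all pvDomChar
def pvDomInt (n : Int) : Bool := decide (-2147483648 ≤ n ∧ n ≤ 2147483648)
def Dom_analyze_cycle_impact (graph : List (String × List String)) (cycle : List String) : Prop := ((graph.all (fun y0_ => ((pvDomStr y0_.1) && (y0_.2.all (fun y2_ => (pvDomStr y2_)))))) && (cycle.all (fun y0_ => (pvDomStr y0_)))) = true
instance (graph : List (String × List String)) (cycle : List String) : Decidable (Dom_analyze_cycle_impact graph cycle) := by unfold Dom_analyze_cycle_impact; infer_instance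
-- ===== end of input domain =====

-- B replaces A's per-node BFS (one search from every graph key) by a single multi-source
-- BFS from the cycle nodes over the reversed adjacency, then filters the graph keys.

-- ===== PORT A =====
-- shared inner loop of both Pythons: `for x in ns: if x not in seen: seen.add(x); q.append(x)`
def pvPush (seen : PySem.Set String) (q : List String) (ns : List String) :
    PySem.Set String × List String :=
  ns.foldl (fun p u => if p.1.contains u then p else (PySem.Set.add p.1 u, p.2 ++ [u])) (seen, q)

theorem pvPush_spec (seen : PySem.Set String) (q ns : List String) :
    ∃ t, pvPush seen q ns = (seen ++ t, q ++ t) ∧ PySem.Set.update seen ns = seen ++ t := by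
  induction ns generalizing seen q with
  | nil => exact ⟨[], by simp [pvPush, PySem.Set.update_nil]⟩
  | cons u ns ih =>
    by_cases hu : u ∈ seen
    · obtain ⟨t, h1, h2⟩ := ih seen q
      refine ⟨t, ?_, ?_⟩
      · simpa [pvPush, PySem.Set.contains_eq_listContains, hu] using h1
      · rw [PySem.Set.update_cons, PySem.Set.add_of_mem hu]; exact h2
    · obtain ⟨t, h1, h2⟩ := ih (seen ++ [u]) (q ++ [u])
      refine ⟨u :: t, ?_, ?_⟩
      · simpa [pvPush, PySem.Set.contains_eq_listContains, hu, PySem.Set.add_of_not_mem] using h1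
      · rw [PySem.Set.update_cons, PySem.Set.add_of_not_mem hu]; simpa using h2

theorem pvNodupLen (v U : List String) (hv : v.Nodup) (hU : ∀ x ∈ v, x ∈ U) :
    v.length ≤ U.length :=
  List.Subperm.length_le (hv.subperm (fun _ h => hU _ h))

def pvBfsA (d : PySem.Dict String (List String)) (C : PySem.Set String) (U : List String)
    (q : List String) (v : PySem.Set String)
    (hq : ∀ x ∈ q, x ∈ v) (hv : v.Nodup) (hU : ∀ x ∈ v, x ∈ U)
    (hd : ∀ k l, d.get? k = some l → ∀ x ∈ l, x ∈ U) : Bool :=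
  match q with
  | [] => false
  | current :: rest =>
    if C.contains current then true
    else if d.contains current then
      pvBfsA d C U (pvPush v rest (d.getD current [])).2 (pvPush v rest (d.getD current [])).1
        (by
          obtain ⟨t, h1, h2⟩ := pvPush_spec v rest (d.getD current [])
          rw [h1]; intro x hx
          rcases List.mem_append.1 hx with h | h
          · exact List.mem_append_left _ (hq x (List.mem_cons_of_mem _ h))
          · exact List.mem_append_right _ h)
        (by
          obtain ⟨t, h1, h2⟩ := pvPush_spec v rest (d.getD current [])
          rw [h1, ← h2]; exact PySem.Set.nodup_update _ _ hv)
        (by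
          obtain ⟨t, h1, h2⟩ := pvPush_spec v rest (d.getD current [])
          rw [h1, ← h2]; intro x hx
          rcases (PySem.Set.mem_update _ _ _).1 hx with h | h
          · exact hU x h
          · rcases hcon : d.get? current with _ | l
            · simp [PySem.Dict.getD_of_get?_eq_none d _ hcon] at h
            · exact hd current l hcon x (by rwa [PySem.Dict.getD_of_get?_eq_some d _ hcon] at h))
        hd
    else
      pvBfsA d C U rest v (fun x hx => hq x (List.mem_cons_of_mem _ hx)) hv hU hd
termination_by (U.length + 1 - v.length, q.length)
decreasing_by
  · obtain ⟨t, h1, h2⟩ := pvPush_spec v rest (d.getD current [])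
    rw [h1]
    rcases t with _ | ⟨a, t⟩
    · simp only [List.append_nil]
      exact Prod.Lex.right _ (by simp)
    · have hlen : (v ++ a :: t).length ≤ U.length := by
        apply pvNodupLen _ _ (h2 ▸ PySem.Set.nodup_update _ _ hv)
        intro x hx
        rcases (PySem.Set.mem_update _ _ _).1 (h2 ▸ hx) with h | h
        · exact hU x h
        · rcases hcon : d.get? current with _ | l
          · simp [PySem.Dict.getD_of_get?_eq_none d _ hcon] at h
          · exact hd current l hcon x (by rwa [PySem.Dict.getD_of_get?_eq_some d _ hcon] at h)
      have hvU : v.length ≤ U.length := pvNodupLen v U hv hU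
      apply Prod.Lex.left
      simp at hlen ⊢
      omega
  · exact Prod.Lex.right _ (by simp)

-- named proof obligations of the A-side BFS call (hypothesis arguments of pvBfsA)
theorem pvAhq (n : String) : ∀ x ∈ [n], x ∈ PySem.Set.ofList [n] := by
  intro x hx; simpa using hx

theorem pvAhv (n : String) : (PySem.Set.ofList [n]).Nodup := PySem.Set.nodup_ofList _

theorem pvAhU (d : PySem.Dict String (List String)) (n : String) :
    ∀ x ∈ PySem.Set.ofList [n], x ∈ n :: d.values.flatten := by
  intro x hx; simp at hx; simp [hx]

theorem pvAhd (d : PySem.Dict String (List String)) (n : String) :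
    ∀ k l, d.get? k = some l → ∀ x ∈ l, x ∈ n :: d.values.flatten := by
  intro k l hget x hx
  refine List.mem_cons_of_mem _ (List.mem_flatten.2 ⟨l, ?_, hx⟩)
  exact List.mem_map_of_mem (PySem.Dict.mem_items_of_get?_eq_some d hget)

def analyze_cycle_impact (graph : List (String × List String)) (cycle : List String) : List String :=
  let d := PySem.Dict.ofList graph
  let C := PySem.Set.ofList cycle.dropLast   -- cycle[:-1]
  d.keys.foldl (fun impacted node =>
    if C.contains node then impacted
    else if pvBfsA d C (node :: d.values.flatten) [node] (PySem.Set.ofList [node])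
        (pvAhq node) (pvAhv node) (pvAhU d node) (pvAhd d node)
      then PySem.Set.add impacted node else impacted)
    PySem.Set.empty

-- ===== PORT B =====
-- reversed adjacency: for u, nbrs in d.items(): for v in nbrs: rev.setdefault(v, []).append(u)
def pvRev (d : PySem.Dict String (List String)) : PySem.Dict String (List String) :=
  d.items.foldl (fun r p => p.2.foldl (fun r v => r.modify v [] (· ++ [p.1])) r) PySem.Dict.empty

def pvEdges (d : PySem.Dict String (List String)) : List (String × String) :=
  d.items.flatMap (fun p => p.2.map (fun v => (v, p.1)))

theorem pvRev_eq_edges_fold (d : PySem.Dict String (List String)) :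
    pvRev d = (pvEdges d).foldl (fun r e => r.modify e.1 [] (· ++ [e.2])) PySem.Dict.empty := by
  unfold pvRev pvEdges
  generalize PySem.Dict.empty = r
  induction d.items generalizing r with
  | nil => rfl
  | cons p ps ih => simp only [List.foldl_cons, List.flatMap_cons, List.foldl_append, List.foldl_map]; exact ih _

theorem pvRev_getD (d : PySem.Dict String (List String)) (k : String) :
    (pvRev d).getD k [] = ((pvEdges d).filter (fun e => e.1 == k)).map (·.2) := by
  rw [pvRev_eq_edges_fold]
  simpa using PySem.Dict.getD_foldl_modify_append (pvEdges d) PySem.Dict.empty k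

theorem pvRev_mem (d : PySem.Dict String (List String)) (k x : String) :
    x ∈ (pvRev d).getD k [] ↔ ∃ p ∈ d.items, p.1 = x ∧ k ∈ p.2 := by
  rw [pvRev_getD]
  simp only [pvEdges, List.mem_map, List.mem_filter, List.mem_flatMap]
  constructor
  · rintro ⟨e, ⟨⟨p, hp, ⟨v, hv, rfl⟩⟩, hk⟩, rfl⟩
    simp only [beq_iff_eq] at hk
    exact ⟨p, hp, rfl, hk ▸ hv⟩
  · rintro ⟨p, hp, rfl, hk⟩
    exact ⟨(k, p.1), ⟨⟨p, hp, ⟨k, hk, rfl⟩⟩, by simp⟩, rfl⟩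

theorem pvRev_getD_subset_keys (d : PySem.Dict String (List String)) (k x : String)
    (h : x ∈ (pvRev d).getD k []) : x ∈ d.keys := by
  obtain ⟨p, hp, rfl, -⟩ := (pvRev_mem d k x).1 h
  exact List.mem_map_of_mem hp

def pvLoopB (rev : PySem.Dict String (List String)) (U : List String)
    (stack : List String) (reach : PySem.Set String)
    (hq : ∀ x ∈ stack, x ∈ reach) (hv : reach.Nodup) (hU : ∀ x ∈ reach, x ∈ U)
    (hrev : ∀ k x, x ∈ rev.getD k [] → x ∈ U) : PySem.Set String :=
  match stack with
  | [] => reach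
  | v0 :: rest =>
    pvLoopB rev U (pvPush reach rest (rev.getD v0 [])).2 (pvPush reach rest (rev.getD v0 [])).1
      (by
        obtain ⟨t, h1, h2⟩ := pvPush_spec reach rest (rev.getD v0 [])
        rw [h1]; intro x hx
        rcases List.mem_append.1 hx with h | h
        · exact List.mem_append_left _ (hq x (List.mem_cons_of_mem _ h))
        · exact List.mem_append_right _ h)
      (by
        obtain ⟨t, h1, h2⟩ := pvPush_spec reach rest (rev.getD v0 [])
        rw [h1, ← h2]; exact PySem.Set.nodup_update _ _ hv)
      (by
        obtain ⟨t, h1, h2⟩ := pvPush_spec reach rest (rev.getD v0 [])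
        rw [h1, ← h2]; intro x hx
        rcases (PySem.Set.mem_update _ _ _).1 hx with h | h
        · exact hU x h
        · exact hrev v0 x h)
      hrev
termination_by (U.length + 1 - reach.length, stack.length)
decreasing_by
  obtain ⟨t, h1, h2⟩ := pvPush_spec reach rest (rev.getD v0 [])
  rw [h1]
  rcases t with _ | ⟨a, t⟩
  · simp only [List.append_nil]
    exact Prod.Lex.right _ (by simp)
  · have hlen : (reach ++ a :: t).length ≤ U.length := by
      apply pvNodupLen _ _ (h2 ▸ PySem.Set.nodup_update _ _ hv)
      intro x hx
      rcases (PySem.Set.mem_update _ _ _).1 (h2 ▸ hx) with h | h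
      · exact hU x h
      · exact hrev v0 x h
    have hvU : reach.length ≤ U.length := pvNodupLen reach U hv hU
    apply Prod.Lex.left
    simp at hlen ⊢
    omega

-- named proof obligations of the B-side worklist call (hypothesis arguments of pvLoopB)
theorem pvBhq (C : PySem.Set String) : ∀ x ∈ (C : List String), x ∈ C := fun _ hx => hx

theorem pvBhU (d : PySem.Dict String (List String)) (C : PySem.Set String) :
    ∀ x ∈ (C : List String), x ∈ C ++ d.keys := fun _ hx => List.mem_append_left _ hx

theorem pvBhrev (d : PySem.Dict String (List String)) (C : PySem.Set String) :
    ∀ k x, x ∈ (pvRev d).getD k [] → x ∈ C ++ d.keys :=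
  fun k x hx => List.mem_append_right _ (pvRev_getD_subset_keys d k x hx)

def analyze_cycle_impact_alt (graph : List (String × List String)) (cycle : List String) : List String :=
  let d := PySem.Dict.ofList graph
  let C := PySem.Set.ofList cycle.dropLast   -- cycle[:-1]
  let rev := pvRev d
  let reach := pvLoopB rev (C ++ d.keys) C C
    (pvBhq C) (PySem.Set.nodup_ofList _) (pvBhU d C) (pvBhrev d C)
  d.keys.foldl (fun out n =>
    if !C.contains n && reach.contains n then PySem.Set.add out n else out) PySem.Set.empty

-- ===== PRECONDITION & SPEC =====
def Spec_analyze_cycle_impact (graph : List (String × List String)) (cycle : List String) (out : List String) : Prop := out = analyze_cycle_impact_alt graph cycle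
instance (graph : List (String × List String)) (cycle : List String) (out : List String) : Decidable (Spec_analyze_cycle_impact graph cycle out) := by unfold Spec_analyze_cycle_impact; infer_instance

-- ===== CLAIM (what is proved, stated in full; the proofs are below) =====
def Claim_equal_analyze_cycle_impact : Prop := ∀ (graph : List (String × List String)) (cycle : List String), Dom_analyze_cycle_impact graph cycle → Spec_analyze_cycle_impact graph cycle (analyze_cycle_impact graph cycle)

-- ===== LEMMAS AND PROOFS =====

inductive pvReaches (d : PySem.Dict String (List String)) (C : PySem.Set String) : String → Prop
  | base (x : String) : x ∈ C → pvReaches d C x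
  | step (x : String) (l : List String) (y : String) :
      d.get? x = some l → y ∈ l → pvReaches d C y → pvReaches d C x

theorem pvBfsA_sound (d : PySem.Dict String (List String)) (C : PySem.Set String) (U : List String)
    (q : List String) (v : PySem.Set String) (hq hv hU hd) :
    pvBfsA d C U q v hq hv hU hd = true → ∃ x ∈ v, pvReaches d C x := by
  fun_induction pvBfsA with
  | case1 => simp
  | case2 v hv hU current rest hq hC hq2 =>
    intro _
    exact ⟨current, hq current List.mem_cons_self, .base _ ((PySem.Set.contains_iff _ _).1 hC)⟩
  | case3 v hv hU current rest hq hC hin hq2 ih =>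
    intro htrue
    obtain ⟨x, hx, hr⟩ := ih htrue
    obtain ⟨t, h1, h2⟩ := pvPush_spec v rest (d.getD current [])
    rw [h1] at hx
    rcases (PySem.Set.mem_update _ _ _).1 (h2 ▸ hx) with h | h
    · exact ⟨x, h, hr⟩
    · rcases hcon : d.get? current with _ | l
      · simp [PySem.Dict.getD_of_get?_eq_none d _ hcon] at h
      · rw [PySem.Dict.getD_of_get?_eq_some d _ hcon] at h
        exact ⟨current, hq current List.mem_cons_self, .step current l x hcon h hr⟩
  | case4 v hv hU current rest hq hC hin hq2 ih =>
    intro htrue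
    exact ih htrue

theorem pvClosed_not_reaches (d : PySem.Dict String (List String)) (C : PySem.Set String)
    (v : List String)
    (hcl : ∀ x ∈ v, C.contains x = false ∧ ∀ l, d.get? x = some l → ∀ y ∈ l, y ∈ v) :
    ∀ x ∈ v, ¬ pvReaches d C x := by
  intro x hx h
  induction h with
  | base z hz =>
    have h2 := (PySem.Set.contains_iff C z).2 hz
    rw [(hcl z hx).1] at h2
    simp at h2
  | step z l y hget hy hr ih => exact ih ((hcl z hx).2 l hget y hy)

theorem pvBfsA_false (d : PySem.Dict String (List String)) (C : PySem.Set String) (U : List String)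
    (q : List String) (v : PySem.Set String) (hq hv hU hd) :
    pvBfsA d C U q v hq hv hU hd = false → q.Nodup →
    (∀ x ∈ v, x ∉ q → C.contains x = false ∧ ∀ l, d.get? x = some l → ∀ y ∈ l, y ∈ v) →
    ∀ x ∈ v, ¬ pvReaches d C x := by
  fun_induction pvBfsA with
  | case1 v hq hv hU =>
    intro _ _ hdone
    exact pvClosed_not_reaches d C v (fun x hx => hdone x hx (by simp))
  | case2 v hv hU current rest hq hC hq2 =>
    simp
  | case3 v hv hU current rest hq hC hin hq2 ih =>
    intro hf hnd hdone
    obtain ⟨t, h1, h2⟩ := pvPush_spec v rest (d.getD current [])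
    have hvt : (v ++ t).Nodup := h2 ▸ PySem.Set.nodup_update _ _ hv
    have htv : ∀ y ∈ t, y ∉ v := by
      intro y hy hyv
      exact (List.nodup_append.1 hvt).2.2 y hyv y hy rfl
    have hrest : ∀ y ∈ rest, y ∈ v := fun y hy => hq y (List.mem_cons_of_mem _ hy)
    have hns : ∀ y ∈ d.getD current [], y ∈ v ++ t := by
      intro y hy
      exact h2 ▸ (PySem.Set.mem_update _ _ _).2 (Or.inr hy)
    have H := ih hf
    simp only [h1] at H
    have hnd' : (rest ++ t).Nodup := by
      rw [List.nodup_append]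
      exact ⟨hnd.of_cons, (List.nodup_append.1 hvt).2.1,
        fun a ha b hb => fun hab => htv b hb (hab ▸ hrest a ha)⟩
    have hdone' : ∀ x ∈ v ++ t, x ∉ rest ++ t →
        C.contains x = false ∧ ∀ l, d.get? x = some l → ∀ y ∈ l, y ∈ v ++ t := by
      intro x hx hxq
      rcases List.mem_append.1 hx with hxv | hxt
      · by_cases hxc : x = current
        · subst hxc
          refine ⟨by simpa using hC, ?_⟩
          intro l hget y hy
          rw [PySem.Dict.getD_of_get?_eq_some d _ hget] at hns
          exact hns y hy
        · have hxq0 : x ∉ current :: rest := by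
            intro hmem
            rcases List.mem_cons.1 hmem with h | h
            · exact hxc h
            · exact hxq (List.mem_append_left _ h)
          obtain ⟨c1, c2⟩ := hdone x hxv hxq0
          exact ⟨c1, fun l hget y hy => List.mem_append_left _ (c2 l hget y hy)⟩
      · exact absurd (List.mem_append_right _ hxt) hxq
    intro x hx
    exact H hnd' hdone' x (List.mem_append_left _ hx)
  | case4 v hv hU current rest hq hC hin hq2 ih =>
    intro hf hnd hdone
    have hdone'' : ∀ x ∈ v, x ∉ rest →
        C.contains x = false ∧ ∀ l, d.get? x = some l → ∀ y ∈ l, y ∈ v := by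
      intro x hx hxr
      by_cases hxc : x = current
      · subst hxc
        refine ⟨by simpa using hC, ?_⟩
        intro l hget
        rw [(PySem.Dict.get?_eq_none_iff_contains d x).2 (by simpa using hin)] at hget
        cases hget
      · refine hdone x hx ?_
        intro hmem
        rcases List.mem_cons.1 hmem with h | h
        · exact hxc h
        · exact hxr h
    exact ih hf hnd.of_cons hdone''

theorem pvLoopB_mono (rev : PySem.Dict String (List String)) (U : List String)
    (stack : List String) (reach : PySem.Set String) (hq hv hU hrev) :
    ∀ x ∈ reach, x ∈ pvLoopB rev U stack reach hq hv hU hrev := by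
  fun_induction pvLoopB with
  | case1 reach hv hU => exact fun x hx => hx
  | case2 reach hv hU v0 rest hq hq2 ih =>
    intro x hx
    obtain ⟨t, h1, h2⟩ := pvPush_spec reach rest (rev.getD v0 [])
    have := ih x (by rw [h1]; exact List.mem_append_left _ hx)
    exact this

theorem pvLoopB_sound (rev : PySem.Dict String (List String)) (U : List String)
    (stack : List String) (reach : PySem.Set String) (hq hv hU hrev)
    (P : String → Prop) (hstep : ∀ k x, x ∈ rev.getD k [] → P k → P x)
    (hR : ∀ x ∈ reach, P x) :
    ∀ x ∈ pvLoopB rev U stack reach hq hv hU hrev, P x := by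
  fun_induction pvLoopB with
  | case1 reach hv hU => exact hR
  | case2 reach hv hU v0 rest hq hq2 ih =>
    obtain ⟨t, h1, h2⟩ := pvPush_spec reach rest (rev.getD v0 [])
    refine ih ?_
    intro x hx
    rw [h1] at hx
    rcases (PySem.Set.mem_update _ _ _).1 (h2 ▸ hx) with h | h
    · exact hR x h
    · exact hstep v0 x h (hR v0 (hq v0 List.mem_cons_self))

theorem pvLoopB_closed (rev : PySem.Dict String (List String)) (U : List String)
    (stack : List String) (reach : PySem.Set String) (hq hv hU hrev) :
    stack.Nodup →
    (∀ x ∈ reach, x ∉ stack → ∀ y ∈ rev.getD x [], y ∈ reach) →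
    ∀ x ∈ pvLoopB rev U stack reach hq hv hU hrev, ∀ y ∈ rev.getD x [],
      y ∈ pvLoopB rev U stack reach hq hv hU hrev := by
  fun_induction pvLoopB with
  | case1 reach hv hU =>
    intro _ hdone x hx y hy
    exact hdone x hx (by simp) y hy
  | case2 reach hv hU v0 rest hq hq2 ih =>
    intro hnd hdone
    obtain ⟨t, h1, h2⟩ := pvPush_spec reach rest (rev.getD v0 [])
    have hvt : (reach ++ t).Nodup := h2 ▸ PySem.Set.nodup_update _ _ hv
    have htv : ∀ y ∈ t, y ∉ reach := by
      intro y hy hyv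
      exact (List.nodup_append.1 hvt).2.2 y hyv y hy rfl
    have hrest : ∀ y ∈ rest, y ∈ reach := fun y hy => hq y (List.mem_cons_of_mem _ hy)
    have hns : ∀ y ∈ rev.getD v0 [], y ∈ reach ++ t := by
      intro y hy
      exact h2 ▸ (PySem.Set.mem_update _ _ _).2 (Or.inr hy)
    have hnd' : (rest ++ t).Nodup := by
      rw [List.nodup_append]
      exact ⟨hnd.of_cons, (List.nodup_append.1 hvt).2.1,
        fun a ha b hb => fun hab => htv b hb (hab ▸ hrest a ha)⟩
    have hdone' : ∀ x ∈ (pvPush reach rest (rev.getD v0 [])).1,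
        x ∉ (pvPush reach rest (rev.getD v0 [])).2 → ∀ y ∈ rev.getD x [],
        y ∈ (pvPush reach rest (rev.getD v0 [])).1 := by
      simp only [h1]
      intro x hx hxq
      rcases List.mem_append.1 hx with hxv | hxt
      · by_cases hxc : x = v0
        · subst hxc
          exact fun y hy => hns y hy
        · have hxq0 : x ∉ v0 :: rest := by
            intro hmem
            rcases List.mem_cons.1 hmem with h | h
            · exact hxc h
            · exact hxq (List.mem_append_left _ h)
          exact fun y hy => List.mem_append_left _ (hdone x hxv hxq0 y hy)
      · exact absurd (List.mem_append_right _ hxt) hxq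
    exact ih (by simp only [h1]; exact hnd') hdone'

theorem pvBfsA_start_iff (d : PySem.Dict String (List String)) (C : PySem.Set String)
    (U : List String) (n : String) (hq hv hU hd) :
    pvBfsA d C U [n] (PySem.Set.ofList [n]) hq hv hU hd = true ↔ pvReaches d C n := by
  constructor
  · intro h
    obtain ⟨x, hx, hr⟩ := pvBfsA_sound d C U [n] _ hq hv hU hd h
    have hxn : x = n := by simpa using (PySem.Set.mem_ofList _ _).1 hx
    exact hxn ▸ hr
  · intro hr
    by_contra h
    rw [Bool.not_eq_true] at h
    refine pvBfsA_false d C U [n] _ hq hv hU hd h (by simp) ?_ n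
      ((PySem.Set.mem_ofList _ _).2 (by simp)) hr
    intro x hx hxq
    exact absurd (by simpa using (PySem.Set.mem_ofList _ _).1 hx) (by simpa using hxq)

theorem pvLoopB_start_iff (d : PySem.Dict String (List String)) (C : PySem.Set String)
    (hkeys : d.keys.Nodup) (hCn : C.Nodup) (hq hv hU hrev) (x : String) :
    x ∈ pvLoopB (pvRev d) (C ++ d.keys) C C hq hv hU hrev ↔ pvReaches d C x := by
  constructor
  · refine pvLoopB_sound (pvRev d) (C ++ d.keys) C C hq hv hU hrev (pvReaches d C) ?_ ?_ x
    · intro k y hy hrk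
      obtain ⟨p, hp, hpy, hkp⟩ := (pvRev_mem d k y).1 hy
      have hget : d.get? p.1 = some p.2 :=
        (PySem.Dict.get?_eq_some_iff_mem_items d p.1 p.2 hkeys).2 (by simpa using hp)
      exact hpy ▸ pvReaches.step p.1 p.2 k hget hkp hrk
    · exact fun y hy => .base y hy
  · intro hr
    have hclosed := pvLoopB_closed (pvRev d) (C ++ d.keys) C C hq hv hU hrev hCn
      (fun a ha haq => absurd ha haq)
    induction hr with
    | base z hz => exact pvLoopB_mono _ _ _ _ hq hv hU hrev z hz
    | step z l y hget hy hr ih =>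
      refine hclosed y ih z ?_
      exact (pvRev_mem d y z).2 ⟨(z, l), PySem.Dict.mem_items_of_get?_eq_some d hget, rfl, hy⟩

theorem pvFoldCongr (F G : PySem.Set String → String → PySem.Set String)
    (h : ∀ s n, F s n = G s n) :
    ∀ (l : List String) (s : PySem.Set String), l.foldl F s = l.foldl G s := by
  intro l
  induction l with
  | nil => intro s; rfl
  | cons n l ih => intro s; rw [List.foldl_cons, List.foldl_cons, h s n]; exact ih _


theorem pv_main (graph : List (String × List String)) (cycle : List String) :
    analyze_cycle_impact graph cycle = analyze_cycle_impact_alt graph cycle := by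
  unfold analyze_cycle_impact analyze_cycle_impact_alt
  refine pvFoldCongr _ _ ?_ _ _
  intro s n
  have hcB : ((PySem.Set.ofList cycle.dropLast).contains n = true) ↔ n ∈ cycle.dropLast :=
    (PySem.Set.contains_iff _ _).trans (PySem.Set.mem_ofList _ _)
  have h1 := pvBfsA_start_iff (PySem.Dict.ofList graph)
    (PySem.Set.ofList cycle.dropLast) (n :: (PySem.Dict.ofList graph).values.flatten) n
    (pvAhq n) (pvAhv n) (pvAhU _ n) (pvAhd _ n)
  have hR := (PySem.Set.contains_iff
      (pvLoopB (pvRev (PySem.Dict.ofList graph))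
        (PySem.Set.ofList cycle.dropLast ++ (PySem.Dict.ofList graph).keys)
        (PySem.Set.ofList cycle.dropLast) (PySem.Set.ofList cycle.dropLast)
        (pvBhq _) (PySem.Set.nodup_ofList _) (pvBhU _ _) (pvBhrev _ _)) n).trans
    (pvLoopB_start_iff (PySem.Dict.ofList graph) (PySem.Set.ofList cycle.dropLast)
      (PySem.Dict.nodup_keys_ofList _) (PySem.Set.nodup_ofList _)
      (pvBhq _) (PySem.Set.nodup_ofList _) (pvBhU _ _) (pvBhrev _ _) n)
  by_cases hm : n ∈ cycle.dropLast
  · have hc1 := hcB.2 hm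
    rw [if_pos hc1, if_neg (by simp; exact fun h => absurd hm h)]
  · have hc0 : (PySem.Set.ofList cycle.dropLast).contains n = false := by
      rw [← Bool.not_eq_true]; exact fun h => hm (hcB.1 h)
    rw [if_neg (by simp; exact hm)]
    by_cases hr : pvReaches (PySem.Dict.ofList graph) (PySem.Set.ofList cycle.dropLast) n
    · rw [if_pos (h1.2 hr), if_pos (by simp; exact ⟨hm, (PySem.Set.contains_iff _ _).1 (hR.2 hr)⟩)]
    · have hr0 : (pvLoopB (pvRev (PySem.Dict.ofList graph))
          (PySem.Set.ofList cycle.dropLast ++ (PySem.Dict.ofList graph).keys)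
          (PySem.Set.ofList cycle.dropLast) (PySem.Set.ofList cycle.dropLast)
          (pvBhq _) (PySem.Set.nodup_ofList _) (pvBhU _ _) (pvBhrev _ _)).contains n = false := by
        rw [← Bool.not_eq_true]; exact fun h => hr (hR.1 h)
      rw [if_neg (fun h => hr (h1.1 h)), if_neg (by
        simp
        intro _ hmemb
        exact absurd ((PySem.Set.contains_iff _ _).2 hmemb)
          (fun hcc => by rw [hr0] at hcc; cases hcc))]

-- ===== VERDICT (by name: the statement is the Claim_ definition above) =====
theorem analyze_cycle_impact_spec : Claim_equal_analyze_cycle_impact := by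
  unfold Claim_equal_analyze_cycle_impact Spec_analyze_cycle_impact
  intro graph cycle _
  exact pv_main graph cycle
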